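-- pv_equiv track=rewrite | github.com/crypdick/auto_docs_editor | auto_docs_editor/core.py | expand_edit_context
-- ===== SOURCE A (Python) =====
-- def expand_edit_context(
--     full_content: str, before: str, after: str, context_lines: int = 3
-- ) -> tuple[str, str]:
--     """Expand the edit context to include surrounding lines.
--
--     Args:
--         full_content: The full document text.
--         before: The text being replaced.
--         after: The replacement text.
--         context_lines: Number of lines of context to include before and after.
--
--     Returns:
--         tuple[str, str]: The expanded (before, after) strings.
--     """
--     try:
--         start_idx = full_content.index(before)
--     except ValueError:
--         # If text not found, return original strings (will fail later in apply_edit)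
--         return before, after
--
--     end_idx = start_idx + len(before)
--
--     # Find start of context (scan backwards)
--     scan_start = start_idx
--
--     # First, find the start of the line containing the match
--     line_start = full_content.rfind("\n", 0, start_idx) + 1
--     scan_start = line_start
--
--     # Now go back N lines
--     for _ in range(context_lines):
--         if scan_start == 0:
--             break
--         prev_newline = full_content.rfind("\n", 0, scan_start - 1)
--         if prev_newline == -1:
--             scan_start = 0
--             break
--         scan_start = prev_newline + 1
--
--     expanded_start = scan_start
--
--     # Find end of context (scan forwards)
--     scan_end = end_idx
--
--     # Find the end of the line containing the match
--     line_end = full_content.find("\n", end_idx)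
--     if line_end == -1:
--         line_end = len(full_content)
--     else:
--         # Include the newline character of the current line
--         line_end += 1
--
--     scan_end = line_end
--
--     # Now go forward N lines
--     for _ in range(context_lines):
--         next_newline = full_content.find("\n", scan_end)
--         if next_newline == -1:
--             scan_end = len(full_content)
--             break
--         # Include the newline
--         scan_end = next_newline + 1
--
--     expanded_end = scan_end
--
--     # Extract the expanded original block
--     original_block = full_content[expanded_start:expanded_end]
--
--     # Construct the new block by splicing the replacement into the expanded block
--     # We use relative offsets from expanded_start
--     rel_start = start_idx - expanded_start
--     rel_end = rel_start + len(before)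
--
--     new_block = original_block[:rel_start] + after + original_block[rel_end:]
--
--     return original_block, new_block
-- ===== SOURCE B (Python) =====
-- def expand_edit_context(full_content, before, after, context_lines=3):
--     """Expand the edit context to include surrounding lines.
--
--     Precomputes the starting offset of every line once, then picks the
--     expanded region by pure line-index arithmetic (no repeated rfind/find scans).
--     """
--     start_idx = full_content.find(before)
--     if start_idx == -1:
--         return before, after
--     end_idx = start_idx + len(before)
--
--     # Character offset at which each line begins.
--     starts = [0]
--     for i, ch in enumerate(full_content):
--         if ch == "\n":
--             starts.append(i + 1)
--
--     start_line = sum(1 for p in starts if p <= start_idx) - 1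
--     end_line = sum(1 for p in starts if p <= end_idx) - 1
--
--     k = max(context_lines, 0)
--     lo = max(start_line - k, 0)
--     hi = end_line + k
--     expanded_start = starts[lo]
--     expanded_end = starts[hi + 1] if hi + 1 < len(starts) else len(full_content)
--
--     block = full_content[expanded_start:expanded_end]
--     rel = start_idx - expanded_start
--     new_block = block[:rel] + after + block[rel + len(before):]
--     return block, new_block
-- ===== Notes on version B (the rewrite author's own statement) =====
-- stated objective: alternative
-- what changed: Replaces A's repeated rfind/find newline scans (one scan per context line in each direction) by a single pass that precomputes every line's starting offset, then selects the expanded region by line-index arithmetic.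
import Mathlib
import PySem

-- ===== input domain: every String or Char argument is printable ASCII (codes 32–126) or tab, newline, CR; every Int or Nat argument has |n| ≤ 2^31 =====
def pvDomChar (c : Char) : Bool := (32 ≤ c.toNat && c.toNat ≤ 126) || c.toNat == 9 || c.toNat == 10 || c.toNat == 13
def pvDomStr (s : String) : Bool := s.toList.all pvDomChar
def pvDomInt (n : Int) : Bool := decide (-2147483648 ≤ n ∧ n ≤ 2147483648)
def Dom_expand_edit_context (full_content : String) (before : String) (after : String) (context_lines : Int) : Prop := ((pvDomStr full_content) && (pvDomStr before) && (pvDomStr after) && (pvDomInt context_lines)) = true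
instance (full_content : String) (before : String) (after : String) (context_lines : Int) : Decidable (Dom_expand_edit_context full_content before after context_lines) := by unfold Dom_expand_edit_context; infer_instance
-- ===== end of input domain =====

-- B precomputes line-start offsets once and picks the region by line-index arithmetic
-- instead of A's repeated backward/forward newline scans; equal return values proved on all inputs.

-- ===== PORT A =====
-- 'for _ in range(context_lines): if scan_start == 0: break; prev = full_content.rfind("\n", 0, scan_start-1); …'
def pvExpandBack (s : List Char) : Nat → Int → Int
  | 0, scan => scan
  | n+1, scan =>
    if scan = 0 then scan
    else
      let prev := PySem.Chars.rfindFrom s ['\n'] 0 (some (scan - 1))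
      if prev = -1 then 0
      else pvExpandBack s n (prev + 1)

-- 'for _ in range(context_lines): next_newline = full_content.find("\n", scan_end); …'
def pvExpandFwd (s : List Char) : Nat → Int → Int
  | 0, scan => scan
  | n+1, scan =>
    let nn := PySem.Chars.findFrom s ['\n'] scan none
    if nn = -1 then (s.length : Int)
    else pvExpandFwd s n (nn + 1)

def expand_edit_context (full_content : String) (before : String) (after : String) (context_lines : Int) : String × String :=
  let s := full_content.toList
  let b := before.toList
  let start_idx := PySem.Chars.find s b          -- full_content.index(before); -1 = ValueError, caught below
  if start_idx = -1 then (before, after)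
  else
    let end_idx := start_idx + (b.length : Int)
    let line_start := PySem.Chars.rfindFrom s ['\n'] 0 (some start_idx) + 1
    let expanded_start := pvExpandBack s context_lines.toNat line_start
    let line_end0 := PySem.Chars.findFrom s ['\n'] end_idx none
    let line_end := if line_end0 = -1 then (s.length : Int) else line_end0 + 1
    let expanded_end := pvExpandFwd s context_lines.toNat line_end
    let original_block := PySem.List.slice s (some expanded_start) (some expanded_end)
    let rel_start := start_idx - expanded_start
    let rel_end := rel_start + (b.length : Int)
    let new_block := PySem.List.slice original_block none (some rel_start) ++ after.toList
                      ++ PySem.List.slice original_block (some rel_end) none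
    (String.mk original_block, String.mk new_block)

-- ===== PORT B =====
-- 'starts = [0]; for i, ch in enumerate(full_content): if ch == "\n": starts.append(i+1)'
def pvLineStarts (s : List Char) : List Int :=
  (PySem.List.enumerate s 0).foldl (fun acc p => if p.2 = '\n' then acc ++ [p.1 + 1] else acc) [(0 : Int)]

def expand_edit_context_alt (full_content : String) (before : String) (after : String) (context_lines : Int) : String × String :=
  let s := full_content.toList
  let b := before.toList
  let start_idx := PySem.Chars.find s b
  if start_idx = -1 then (before, after)
  else
    let end_idx := start_idx + (b.length : Int)
    let starts := pvLineStarts s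
    let start_line := (starts.countP (fun p => decide (p ≤ start_idx)) : Int) - 1
    let end_line := (starts.countP (fun p => decide (p ≤ end_idx)) : Int) - 1
    let k := max context_lines 0
    let lo := max (start_line - k) 0
    let hi := end_line + k
    let expanded_start := PySem.List.pyGetD starts lo 0
    let expanded_end := if hi + 1 < (starts.length : Int) then PySem.List.pyGetD starts (hi + 1) 0
                        else (s.length : Int)
    let block := PySem.List.slice s (some expanded_start) (some expanded_end)
    let rel := start_idx - expanded_start
    let new_block := PySem.List.slice block none (some rel) ++ after.toList
                      ++ PySem.List.slice block (some (rel + (b.length : Int))) none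
    (String.mk block, String.mk new_block)

-- ===== PRECONDITION & SPEC =====
def Spec_expand_edit_context (full_content : String) (before : String) (after : String) (context_lines : Int) (out : String × String) : Prop := out = expand_edit_context_alt full_content before after context_lines
instance (full_content : String) (before : String) (after : String) (context_lines : Int) (out : String × String) : Decidable (Spec_expand_edit_context full_content before after context_lines out) := by unfold Spec_expand_edit_context; infer_instance

-- ===== CLAIM (what is proved, stated in full; the proofs are below) =====
def Claim_equal_expand_edit_context : Prop := ∀ (full_content : String) (before : String) (after : String) (context_lines : Int), Dom_expand_edit_context full_content before after context_lines → Spec_expand_edit_context full_content before after context_lines (expand_edit_context full_content before after context_lines)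

-- ===== LEMMAS AND PROOFS =====

theorem pvLineStarts_spec (s : List Char) :
    pvLineStarts s = 0 :: ((List.range s.length).filter (fun i => s[i]? = some '\n')).map (fun i : Nat => (↑i + 1 : Int)) := by
  induction s using List.reverseRecOn with
  | nil => simp [pvLineStarts, PySem.List.enumerate]
  | append_singleton s c ih =>
    have h1 : pvLineStarts (s ++ [c]) = (pvLineStarts s) ++ (if c = '\n' then [(s.length : Int) + 1] else []) := by
      simp only [pvLineStarts, PySem.List.enumerate_append, List.foldl_append]
      simp [PySem.List.enumerate]
      split_ifs <;> simp
    rw [h1, ih]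
    have h2 : (List.range (s ++ [c]).length).filter (fun i => (s ++ [c])[i]? = some '\n')
        = (List.range s.length).filter (fun i => s[i]? = some '\n') ++ (if c = '\n' then [s.length] else []) := by
      rw [List.length_append, List.length_singleton, List.range_succ, List.filter_append]
      congr 1
      · apply List.filter_congr
        intro i hi
        simp only [List.mem_range] at hi
        rw [List.getElem?_append_left hi]
      · have : (s ++ [c])[s.length]? = some c := by
          rw [List.getElem?_append_right (le_refl s.length)]
          simp
        by_cases hc : c = '\n' <;> simp [hc]
    rw [h2]
    split_ifs <;> simp

theorem pvLS_sorted (s : List Char) : (pvLineStarts s).Pairwise (· < ·) := by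
  rw [pvLineStarts_spec]
  constructor
  · intro x hx
    simp only [List.mem_map, List.mem_filter, List.mem_range] at hx
    obtain ⟨i, -, rfl⟩ := hx
    omega
  · simp only [List.pairwise_map]
    have h : List.Pairwise (· < ·) ((List.range s.length).filter (fun i => decide (s[i]? = some '\n'))) :=
      List.Pairwise.filter _ List.pairwise_lt_range
    exact h.imp (fun hab => by omega)

theorem pvLS_ne_nil (s : List Char) : pvLineStarts s ≠ [] := by
  rw [pvLineStarts_spec]; simp

theorem pvLS_zero (s : List Char) : (pvLineStarts s).getD 0 0 = 0 := by
  rw [pvLineStarts_spec]; simp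

theorem pvLS_mem_iff (s : List Char) (x : Int) :
    x ∈ pvLineStarts s ↔ x = 0 ∨ ∃ i : Nat, i < s.length ∧ s[i]? = some '\n' ∧ x = (i : Int) + 1 := by
  rw [pvLineStarts_spec]
  simp only [List.mem_cons, List.mem_map, List.mem_filter, List.mem_range]
  constructor
  · rintro (rfl | ⟨i, ⟨hi, hnl⟩, rfl⟩)
    · exact Or.inl rfl
    · exact Or.inr ⟨i, hi, by simpa using hnl, rfl⟩
  · rintro (rfl | ⟨i, hi, hnl, rfl⟩)
    · exact Or.inl rfl
    · exact Or.inr ⟨i, ⟨hi, by simpa using hnl⟩, rfl⟩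

theorem pvLS_bounds (s : List Char) (x : Int) (hx : x ∈ pvLineStarts s) :
    0 ≤ x ∧ x ≤ s.length := by
  rw [pvLS_mem_iff] at hx
  rcases hx with rfl | ⟨i, hi, _, rfl⟩ <;> constructor <;> omega

-- sorted counting
theorem sorted_getElem_le_iff_lt_countP (S : List Int) (h : S.Pairwise (· < ·)) (p : Int)
    (i : Nat) (hi : i < S.length) :
    S[i] ≤ p ↔ i < S.countP (fun x => decide (x ≤ p)) := by
  induction S generalizing i with
  | nil => simp at hi
  | cons a T ih =>
    rcases List.pairwise_cons.mp h with ⟨ha, hT⟩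
    by_cases hap : a ≤ p
    · have hc : (a :: T).countP (fun x => decide (x ≤ p)) = T.countP (fun x => decide (x ≤ p)) + 1 := by
        simp [hap]
      cases i with
      | zero => simpa [hc] using hap
      | succ j =>
        have hj : j < T.length := by simpa using hi
        have := ih hT j hj
        simp only [List.getElem_cons_succ, hc]
        omega
    · have hc : (a :: T).countP (fun x => decide (x ≤ p)) = 0 := by
        rw [List.countP_eq_zero]
        intro x hx
        simp only [List.mem_cons] at hx
        rcases hx with rfl | hx
        · simpa using hap
        · have := ha x hx; simp; omega
      cases i with
      | zero => simp [hc]; omega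
      | succ j =>
        have hj : j < T.length := by simpa using hi
        have := ha T[j] (List.getElem_mem hj)
        simp only [List.getElem_cons_succ, hc]
        omega

-- [c] is a prefix of t iff t begins with c
theorem pv_singleton_prefix (c : Char) (t : List Char) : [c] <+: t ↔ t[0]? = some c := by
  cases t with
  | nil => simp
  | cons a u => simp [List.cons_prefix_cons, eq_comm]

theorem pv_singleton_prefix_drop (c : Char) (t : List Char) (j : Nat) :
    [c] <+: t.drop j ↔ t[j]? = some c := by
  rw [pv_singleton_prefix]
  simp [List.getElem?_drop]

theorem pv_singleton_infix (c : Char) (t : List Char) : [c] <:+: t ↔ c ∈ t := by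
  constructor
  · rintro ⟨u, v, rfl⟩; simp
  · intro h
    obtain ⟨i, hi, rfl⟩ := List.mem_iff_getElem.mp h
    exact ⟨t.take i, t.drop (i+1), by simp⟩

-- find on a single char: none case and spec
theorem pv_find_char_eq_neg_one (t : List Char) (c : Char) :
    PySem.Chars.find t [c] = -1 ↔ ∀ j : Nat, t[j]? ≠ some c := by
  rw [PySem.Chars.find_eq_neg_one_iff, pv_singleton_infix]
  constructor
  · intro h j hj; exact h (List.mem_iff_getElem?.mpr ⟨j, hj⟩)
  · intro h hm
    obtain ⟨j, hj⟩ := List.mem_iff_getElem?.mp hm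
    exact h j hj

-- rfind.go spec
theorem pv_rfind_go_spec (t : List Char) (c : Char) (k : Nat) :
    (PySem.Chars.rfind.go t [c] k = -1 ∧ ∀ j ≤ k, t[j]? ≠ some c) ∨
    (∃ j ≤ k, PySem.Chars.rfind.go t [c] k = (j : Int) ∧ t[j]? = some c ∧
      ∀ i, j < i → i ≤ k → t[i]? ≠ some c) := by
  induction k with
  | zero =>
    rw [PySem.Chars.rfind.go.eq_def]
    by_cases h : t[0]? = some c
    · right
      refine ⟨0, le_refl 0, ?_, h, by omega⟩
      simp [show ([c].isPrefixOf t) = true from by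
        rw [List.isPrefixOf_iff_prefix, pv_singleton_prefix]; exact h]
    · left
      constructor
      · simp [show ([c].isPrefixOf t) = false from by
          rw [Bool.eq_false_iff, ne_eq, List.isPrefixOf_iff_prefix, pv_singleton_prefix]; exact h]
      · intro j hj; interval_cases j; exact h
  | succ k ih =>
    rw [PySem.Chars.rfind.go.eq_def]
    by_cases h : t[k+1]? = some c
    · right
      refine ⟨k+1, le_refl _, ?_, h, by omega⟩
      simp [show ([c].isPrefixOf (t.drop (k+1))) = true from by
        rw [List.isPrefixOf_iff_prefix, pv_singleton_prefix_drop]; exact h]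
    · have hpf : ([c].isPrefixOf (t.drop (k+1))) = false := by
        rw [Bool.eq_false_iff, ne_eq, List.isPrefixOf_iff_prefix, pv_singleton_prefix_drop]; exact h
      simp only [hpf, Bool.false_eq_true, if_false]
      rcases ih with ⟨h1, h2⟩ | ⟨j, hj, h1, h2, h3⟩
      · left
        refine ⟨h1, fun j hj => ?_⟩
        rcases Nat.lt_or_ge j (k+1) with hl | hl
        · exact h2 j (by omega)
        · have : j = k+1 := by omega
          subst this; exact h
      · right
        refine ⟨j, by omega, h1, h2, fun i hi1 hi2 => ?_⟩
        rcases Nat.lt_or_ge i (k+1) with hl | hl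
        · exact h3 i hi1 (by omega)
        · have : i = k+1 := by omega
          subst this; exact h

-- index reflection on a strictly sorted list
theorem pv_sorted_le_iff (S : List Int) (h : S.Pairwise (· < ·)) (i j : Nat)
    (hi : i < S.length) (hj : j < S.length) : S[i] ≤ S[j] ↔ i ≤ j := by
  rw [List.pairwise_iff_getElem] at h
  constructor
  · intro hle
    by_contra hc
    have := h j i hj hi (by omega)
    omega
  · intro hle
    rcases Nat.eq_or_lt_of_le hle with rfl | hlt
    · exact le_refl _
    · exact le_of_lt (h i j hi hj hlt)

theorem pv_countP_eq_of_iff (S : List Int) (h : S.Pairwise (· < ·)) (p : Int) (m : Nat)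
    (hm : m ≤ S.length) (hiff : ∀ i (hi : i < S.length), (S[i] ≤ p ↔ i < m)) :
    S.countP (fun x => decide (x ≤ p)) = m := by
  set c := S.countP (fun x => decide (x ≤ p)) with hc
  have hcle : c ≤ S.length := List.countP_le_length
  rcases Nat.lt_trichotomy c m with hlt | heq | hgt
  · have h1 : S[c] ≤ p := (hiff c (by omega)).mpr hlt
    have h2 := (sorted_getElem_le_iff_lt_countP S h p c (by omega)).mp h1
    omega
  · exact heq
  · have h1 : S[m] ≤ p := (sorted_getElem_le_iff_lt_countP S h p m (by omega)).mpr hgt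
    have h2 := (hiff m (by omega)).mp h1
    omega

-- getElem of a member
theorem pv_find_char_spec (t : List Char) (c : Char) (h : PySem.Chars.find t [c] ≠ -1) :
    0 ≤ PySem.Chars.find t [c] ∧ t[(PySem.Chars.find t [c]).toNat]? = some c ∧
      ∀ i < (PySem.Chars.find t [c]).toNat, t[i]? ≠ some c := by
  have h0 : 0 ≤ PySem.Chars.find t [c] := by
    have := PySem.Chars.neg_one_le_find t [c]; omega
  obtain ⟨h1, h2⟩ := PySem.Chars.find_spec h0
  refine ⟨h0, (pv_singleton_prefix_drop c t _).mp h1, fun i hi hc => ?_⟩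
  exact h2 i hi ((pv_singleton_prefix_drop c t i).mpr hc)

-- MAIN F: findFrom for '\n' in terms of the line-starts list
theorem pv_findFrom_nl (s : List Char) (q : Nat) (hq : q ≤ s.length) :
    PySem.Chars.findFrom s ['\n'] (q : Int) none =
      (if (pvLineStarts s).countP (fun x => decide (x ≤ (q : Int))) < (pvLineStarts s).length
       then (pvLineStarts s).getD ((pvLineStarts s).countP (fun x => decide (x ≤ (q : Int)))) 0 - 1
       else -1) := by
  set S := pvLineStarts s with hS
  set cnt := S.countP (fun x => decide (x ≤ (q : Int))) with hcnt
  have hsorted := pvLS_sorted s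
  have hnn := pvLS_ne_nil s
  have hlen0 : 0 < S.length := List.length_pos_of_ne_nil hnn
  have hcle : cnt ≤ S.length := List.countP_le_length
  rw [PySem.Chars.findFrom_natCast s ['\n'] q hq]
  by_cases hlt : cnt < S.length
  · -- there is a next newline: S[cnt] - 1
    have hx : ¬ (S[cnt] ≤ (q : Int)) := by
      intro hc
      have := (sorted_getElem_le_iff_lt_countP S hsorted (q : Int) cnt hlt).mp hc
      omega
    have hxq : (q : Int) < S[cnt] := by omega
    have hmem : S[cnt] ∈ S := List.getElem_mem hlt
    rcases (pvLS_mem_iff s S[cnt]).mp hmem with h0 | ⟨i0, hi0, hnl0, hx0⟩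
    · omega
    -- S[cnt] = i0+1, newline at i0, q ≤ i0
    have hqi0 : q ≤ i0 := by omega
    have hfne : PySem.Chars.find (s.drop q) ['\n'] ≠ -1 := by
      rw [ne_eq, pv_find_char_eq_neg_one]
      push_neg
      exact ⟨i0 - q, by rw [List.getElem?_drop]; rw [show q + (i0 - q) = i0 by omega]; exact hnl0⟩
    obtain ⟨hf0, hfget, hfmin⟩ := pv_find_char_spec (s.drop q) '\n' hfne
    set r := PySem.Chars.find (s.drop q) ['\n'] with hr
    rw [List.getElem?_drop] at hfget
    -- m := q + r.toNat is a newline, show m = i0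
    have hmS : ((q + r.toNat : Nat) : Int) + 1 ∈ S := by
      rw [pvLS_mem_iff]
      right
      refine ⟨q + r.toNat, ?_, hfget, by push_cast; ring⟩
      by_contra hc
      rw [List.getElem?_eq_none_iff.mpr (by omega)] at hfget
      cases hfget
    have hm_le : q + r.toNat ≤ i0 := by
      by_contra hc
      have := hfmin (i0 - q) (by omega)
      rw [List.getElem?_drop, show q + (i0 - q) = i0 by omega] at this
      exact this hnl0
    have hm_ge : i0 ≤ q + r.toNat := by
      by_contra hc
      obtain ⟨jm, hjm, hjme⟩ := List.mem_iff_getElem.mp hmS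
      have hjup : ¬ (S[jm] ≤ (q : Int)) := by rw [hjme]; push_cast; omega
      have hjge : cnt ≤ jm := by
        by_contra hcc
        exact hjup ((sorted_getElem_le_iff_lt_countP S hsorted (q : Int) jm hjm).mpr (by omega))
      have : S[cnt] ≤ S[jm] := (pv_sorted_le_iff S hsorted cnt jm hlt hjm).mpr hjge
      rw [hjme] at this
      push_cast at this
      omega
    have hreq : r = ((i0 - q : Nat) : Int) := by
      have : r.toNat = i0 - q := by omega
      omega
    rw [if_pos hlt, List.getD_eq_getElem _ _ hlt]
    rw [if_neg hfne, hreq]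
    omega
  · -- no newline at or after q
    have hceq : cnt = S.length := by omega
    have hfeq : PySem.Chars.find (s.drop q) ['\n'] = -1 := by
      rw [pv_find_char_eq_neg_one]
      intro j hj
      have hjlen : q + j < s.length := by
        by_contra hc
        rw [List.getElem?_drop, List.getElem?_eq_none_iff.mpr (by omega)] at hj
        cases hj
      rw [List.getElem?_drop] at hj
      have hmS : ((q + j : Nat) : Int) + 1 ∈ S := by
        rw [pvLS_mem_iff]; right; exact ⟨q + j, hjlen, hj, by push_cast; ring⟩
      obtain ⟨jm, hjm, hjme⟩ := List.mem_iff_getElem.mp hmS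
      have : S[jm] ≤ (q : Int) :=
        (sorted_getElem_le_iff_lt_countP S hsorted (q : Int) jm hjm).mpr (by omega)
      rw [hjme] at this
      push_cast at this
      omega
    rw [if_neg hlt, if_pos hfeq]

-- MAIN R: rfind("\n", 0, p) in terms of the line-starts list
theorem pv_rfindFrom_nl (s : List Char) (p : Nat) (hp : p ≤ s.length) :
    PySem.Chars.rfindFrom s ['\n'] 0 (some (p : Int)) =
      (pvLineStarts s).getD ((pvLineStarts s).countP (fun x => decide (x ≤ (p : Int))) - 1) 0 - 1 := by
  set S := pvLineStarts s with hS
  set cnt := S.countP (fun x => decide (x ≤ (p : Int))) with hcnt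
  have hsorted := pvLS_sorted s
  have hnn := pvLS_ne_nil s
  have hlen0 : 0 < S.length := List.length_pos_of_ne_nil hnn
  have hcle : cnt ≤ S.length := List.countP_le_length
  have hS0 : S.getD 0 0 = 0 := pvLS_zero s
  have hS0' : S[0] = 0 := by rw [← List.getD_eq_getElem S 0 hlen0]; exact hS0
  have hcpos : 1 ≤ cnt := by
    have := (sorted_getElem_le_iff_lt_countP S hsorted (p : Int) 0 hlen0).mp (by rw [hS0']; positivity)
    omega
  -- reduce rfindFrom to rfind.go on the truncated string
  have hred : PySem.Chars.rfindFrom s ['\n'] 0 (some (p : Int)) =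
      (if PySem.Chars.rfind.go (s.take p) ['\n'] (s.take p).length = -1 then -1
       else PySem.Chars.rfind.go (s.take p) ['\n'] (s.take p).length) := by
    simp only [PySem.Chars.rfindFrom, PySem.Chars.rfind]
    have h1 : ¬ ((s.length : Int) < (p : Int)) := by omega
    have h2 : ¬ ((p : Int) < 0) := by omega
    simp only [h1, if_false, h2, lt_self_iff_false]
    norm_num
  have htlen : (s.take p).length = p := by simp; omega
  rcases pv_rfind_go_spec (s.take p) '\n' (s.take p).length with ⟨hgo, hnone⟩ | ⟨j, hjle, hgo, hnl, hmax⟩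
  · -- no newline before p: cnt = 1
    have hc1 : cnt = 1 := by
      rw [hcnt]
      apply pv_countP_eq_of_iff S hsorted (p : Int) 1 (by omega)
      intro i hi
      constructor
      · intro hle
        by_contra hc
        have hi1 : 1 ≤ i := by omega
        have hpos : (0 : Int) < S[i] := by
          rw [← hS0']
          exact (List.pairwise_iff_getElem.mp hsorted) 0 i hlen0 hi (by omega)
        rcases (pvLS_mem_iff s S[i]).mp (List.getElem_mem hi) with h0 | ⟨i0, hi0, hnl0, hx0⟩
        · omega
        · have hi0p : i0 < p := by omega
          have := hnone i0 (by omega)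
          rw [List.getElem?_take_of_lt hi0p] at this
          exact this hnl0
      · intro hi1
        have : i = 0 := by omega
        subst this
        rw [hS0']
        positivity
    rw [hred, if_pos hgo, hc1]
    simp only [Nat.sub_self]
    rw [hS0]
    norm_num
  · -- last newline before p is at j, with j+1 = S[cnt-1]
    have hjlt : j < p := by
      by_contra hc
      rw [List.getElem?_eq_none_iff.mpr (by simp; omega)] at hnl
      cases hnl
    have hjs : s[j]? = some '\n' := by rwa [List.getElem?_take_of_lt hjlt] at hnl
    have hjlen : j < s.length := by omega
    have hmem : ((j : Int) + 1) ∈ S := by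
      rw [pvLS_mem_iff]; right; exact ⟨j, hjlen, hjs, rfl⟩
    obtain ⟨jm, hjm, hjme⟩ := List.mem_iff_getElem.mp hmem
    have hcm : cnt = jm + 1 := by
      rw [hcnt]
      apply pv_countP_eq_of_iff S hsorted (p : Int) (jm + 1) (by omega)
      intro i hi
      constructor
      · intro hle
        by_contra hc
        have hgt : jm < i := by omega
        have h1 : S[jm] < S[i] := (List.pairwise_iff_getElem.mp hsorted) jm i hjm hi hgt
        rw [hjme] at h1
        -- S[i] > j+1, S[i] ≤ p: another newline above j, contradiction with maximality
        have hpos : (0 : Int) < S[i] := by omega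
        rcases (pvLS_mem_iff s S[i]).mp (List.getElem_mem hi) with h0 | ⟨i0, hi0, hnl0, hx0⟩
        · omega
        · have hji0 : j < i0 := by omega
          have hi0p : i0 < p := by omega
          have := hmax i0 hji0 (by omega)
          rw [List.getElem?_take_of_lt hi0p] at this
          exact this hnl0
      · intro hile
        have h1 : S[i] ≤ S[jm] := (pv_sorted_le_iff S hsorted i jm hi hjm).mpr (by omega)
        rw [hjme] at h1
        omega
    have hgone : ¬ (PySem.Chars.rfind.go (s.take p) ['\n'] (s.take p).length = -1) := by
      rw [hgo]; omega
    rw [hred, if_neg hgone, hgo, hcm]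
    simp only [Nat.add_sub_cancel]
    rw [List.getD_eq_getElem S 0 hjm, hjme]
    omega



def pvEndOf (s : List Char) (j : Nat) : Int :=
  if j + 1 < (pvLineStarts s).length then (pvLineStarts s).getD (j + 1) 0 else (s.length : Int)

-- basic getElem facts about S, packaged
theorem pvLS_getElem_pos (s : List Char) (j : Nat) (hj : j < (pvLineStarts s).length)
    (hj0 : 0 < j) : 0 < (pvLineStarts s)[j] := by
  have hlen0 : 0 < (pvLineStarts s).length := by omega
  have h0 : (pvLineStarts s)[0] = 0 := by
    rw [← List.getD_eq_getElem _ 0 hlen0]; exact pvLS_zero s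
  have := (List.pairwise_iff_getElem.mp (pvLS_sorted s)) 0 j hlen0 hj hj0
  omega

theorem pvLS_getElem_le (s : List Char) (j : Nat) (hj : j < (pvLineStarts s).length) :
    0 ≤ (pvLineStarts s)[j] ∧ (pvLineStarts s)[j] ≤ s.length :=
  pvLS_bounds s _ (List.getElem_mem hj)

-- count of elements ≤ S[j] - 1 is j
theorem pvLS_countP_pred (s : List Char) (j : Nat) (hj : j < (pvLineStarts s).length) :
    (pvLineStarts s).countP (fun x => decide (x ≤ (pvLineStarts s)[j] - 1)) = j := by
  apply pv_countP_eq_of_iff _ (pvLS_sorted s) _ _ (by omega)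
  intro i hi
  have hsorted := pvLS_sorted s
  constructor
  · intro hle
    by_contra hc
    have : (pvLineStarts s)[j] ≤ (pvLineStarts s)[i] :=
      (pv_sorted_le_iff _ hsorted j i hj hi).mpr (by omega)
    omega
  · intro hij
    have : (pvLineStarts s)[i] < (pvLineStarts s)[j] :=
      (List.pairwise_iff_getElem.mp hsorted) i j hi hj hij
    omega

-- count of elements ≤ S[j] is j+1
theorem pvLS_countP_self (s : List Char) (j : Nat) (hj : j < (pvLineStarts s).length) :
    (pvLineStarts s).countP (fun x => decide (x ≤ (pvLineStarts s)[j])) = j + 1 := by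
  apply pv_countP_eq_of_iff _ (pvLS_sorted s) _ _ (by omega)
  intro i hi
  rw [pv_sorted_le_iff _ (pvLS_sorted s) i j hi hj]
  omega

-- count of elements ≤ len is everything
theorem pvLS_countP_len (s : List Char) :
    (pvLineStarts s).countP (fun x => decide (x ≤ (s.length : Int))) = (pvLineStarts s).length := by
  rw [List.countP_eq_length]
  intro x hx
  have := pvLS_bounds s x hx
  simp
  omega

theorem pv_expandBack_eq (s : List Char) (m j : Nat) (hj : j < (pvLineStarts s).length) :
    pvExpandBack s m ((pvLineStarts s).getD j 0) = (pvLineStarts s).getD (j - m) 0 := by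
  induction m generalizing j with
  | zero => simp [pvExpandBack]
  | succ n ih =>
    rw [List.getD_eq_getElem _ _ hj]
    rw [pvExpandBack]
    by_cases h0 : (pvLineStarts s)[j] = 0
    · -- scan == 0: break
      have hj0 : j = 0 := by
        by_contra hc
        have := pvLS_getElem_pos s j hj (by omega)
        omega
      subst hj0
      rw [if_pos h0, List.getD_eq_getElem _ _ (by omega : 0 - (n+1) < (pvLineStarts s).length)]
      simp [h0]
    · rw [if_neg h0]
      have hjpos : 0 < j := by
        by_contra hc
        have : j = 0 := by omega
        subst this
        have hlen0 : 0 < (pvLineStarts s).length := by omega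
        rw [show (pvLineStarts s)[0] = 0 from by
          rw [← List.getD_eq_getElem _ 0 hlen0]; exact pvLS_zero s] at h0
        exact h0 rfl
      have hbounds := pvLS_getElem_le s j hj
      have hcast : (pvLineStarts s)[j] - 1 = (((pvLineStarts s)[j] - 1).toNat : Int) := by omega
      have hple : ((pvLineStarts s)[j] - 1).toNat ≤ s.length := by omega
      have hrf := pv_rfindFrom_nl s (((pvLineStarts s)[j] - 1).toNat) hple
      rw [← hcast] at hrf
      have hcnt : (pvLineStarts s).countP (fun x => decide (x ≤ (pvLineStarts s)[j] - 1)) = j :=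
        pvLS_countP_pred s j hj
      rw [hcnt] at hrf
      simp only [hrf]
      have hj1 : j - 1 < (pvLineStarts s).length := by omega
      rw [List.getD_eq_getElem _ _ hj1]
      by_cases hz : (pvLineStarts s)[j-1] = 0
      · -- prev == -1: scan_start = 0, break
        have hj1z : j - 1 = 0 := by
          by_contra hc
          have := pvLS_getElem_pos s (j-1) hj1 (by omega)
          omega
        rw [if_pos (by omega)]
        have : j - (n+1) = 0 := by omega
        rw [this, pvLS_zero s]
      · rw [if_neg (by omega)]
        have : (pvLineStarts s)[j-1] - 1 + 1 = (pvLineStarts s)[j-1] := by ring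
        rw [this, ← List.getD_eq_getElem _ _ hj1, ih (j-1) hj1]
        congr 1
        omega

theorem pv_expandFwd_eq (s : List Char) (m j : Nat) (hj : j < (pvLineStarts s).length) :
    pvExpandFwd s m (pvEndOf s j) = pvEndOf s (min (j + m) ((pvLineStarts s).length - 1)) := by
  induction m generalizing j with
  | zero =>
    have h : min (j + 0) ((pvLineStarts s).length - 1) = j := by omega
    rw [h]
    simp [pvExpandFwd]
  | succ n ih =>
    rw [pvExpandFwd]
    by_cases hj1 : j + 1 < (pvLineStarts s).length
    · have hq : pvEndOf s j = (pvLineStarts s)[j+1] := by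
        rw [pvEndOf, if_pos hj1, List.getD_eq_getElem _ _ hj1]
      have hbounds := pvLS_getElem_le s (j+1) hj1
      have hcast : (pvLineStarts s)[j+1] = (((pvLineStarts s)[j+1]).toNat : Int) := by omega
      have hple : ((pvLineStarts s)[j+1]).toNat ≤ s.length := by omega
      have hff := pv_findFrom_nl s (((pvLineStarts s)[j+1]).toNat) hple
      rw [← hcast] at hff
      rw [pvLS_countP_self s (j+1) hj1] at hff
      rw [hq, hff]
      by_cases hj2 : j + 1 + 1 < (pvLineStarts s).length
      · rw [if_pos hj2]
        have hj2' : j + 2 < (pvLineStarts s).length := by omega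
        have hnz : (pvLineStarts s).getD (j+2) 0 - 1 ≠ -1 := by
          rw [List.getD_eq_getElem _ _ hj2']
          have := pvLS_getElem_pos s (j+2) hj2' (by omega)
          omega
        rw [if_neg (by simpa using hnz)]
        have harg : (pvLineStarts s).getD (j+1+1) 0 - 1 + 1 = pvEndOf s (j+1) := by
          rw [pvEndOf, if_pos hj2]
          ring
        rw [harg, ih (j+1) hj1]
        congr 1
        omega
      · rw [if_neg hj2, if_pos rfl]
        have : min (j + (n+1)) ((pvLineStarts s).length - 1) = j + 1 := by omega
        rw [this, pvEndOf, if_neg (by omega)]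
    · -- j is the last line: scan is already len
      have hq : pvEndOf s j = (s.length : Int) := by rw [pvEndOf, if_neg hj1]
      have hff := pv_findFrom_nl s s.length (le_refl _)
      rw [pvLS_countP_len s, if_neg (lt_irrefl _)] at hff
      rw [hq, hff, if_pos rfl]
      have : min (j + (n+1)) ((pvLineStarts s).length - 1) = j := by omega
      rw [this, pvEndOf, if_neg hj1]


theorem pvLS_countP_pos (s : List Char) (q : Int) (hq : 0 ≤ q) :
    1 ≤ (pvLineStarts s).countP (fun x => decide (x ≤ q)) := by
  have hlen0 : 0 < (pvLineStarts s).length := List.length_pos_of_ne_nil (pvLS_ne_nil s)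
  have h0 : (pvLineStarts s)[0] = 0 := by
    rw [← List.getD_eq_getElem _ 0 hlen0]; exact pvLS_zero s
  have := (sorted_getElem_le_iff_lt_countP _ (pvLS_sorted s) q 0 hlen0).mp (by omega)
  omega

theorem pv_main (full_content before after : String) (context_lines : Int) :
    expand_edit_context full_content before after context_lines =
      expand_edit_context_alt full_content before after context_lines := by
  set s := full_content.toList with hs
  set b := before.toList with hb
  by_cases hfind : PySem.Chars.find s b = -1
  · simp only [expand_edit_context, expand_edit_context_alt, ← hs, ← hb, hfind]
    norm_num
  · simp only [expand_edit_context, expand_edit_context_alt, ← hs, ← hb, if_neg hfind]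
    -- names and facts
    have hf0 : 0 ≤ PySem.Chars.find s b := by
      have := PySem.Chars.neg_one_le_find s b; omega
    set st := (PySem.Chars.find s b).toNat with hstdef
    have hst : PySem.Chars.find s b = (st : Int) := by omega
    have hstle : st ≤ s.length := by
      have := PySem.Chars.find_le_length s b; omega
    have hplen : b.length ≤ s.length - st := by
      have := (PySem.Chars.find_spec hf0).1
      have h2 := List.IsPrefix.length_le this
      simp at h2
      omega
    have helen : st + b.length ≤ s.length := by omega
    set S := pvLineStarts s with hS
    have hlen0 : 0 < S.length := List.length_pos_of_ne_nil (pvLS_ne_nil s)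
    set cnt1 := S.countP (fun x => decide (x ≤ (st : Int))) with hcnt1
    set cnt2 := S.countP (fun x => decide (x ≤ ((st + b.length : Nat) : Int))) with hcnt2
    have hcnt1pos : 1 ≤ cnt1 := pvLS_countP_pos s _ (by positivity)
    have hcnt2pos : 1 ≤ cnt2 := pvLS_countP_pos s _ (by positivity)
    have hcnt1le : cnt1 ≤ S.length := List.countP_le_length
    have hcnt2le : cnt2 ≤ S.length := List.countP_le_length
    set k' := context_lines.toNat with hk'
    have hkmax : max context_lines 0 = (k' : Int) := by rw [hk']; omega
    -- expanded_start equality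
    have hL0 : cnt1 - 1 < S.length := by omega
    have hstartA : pvExpandBack s context_lines.toNat
        (PySem.Chars.rfindFrom s ['\n'] 0 (some (PySem.Chars.find s b)) + 1) =
        S.getD (cnt1 - 1 - k') 0 := by
      rw [hst, pv_rfindFrom_nl s st hstle]
      rw [show S.getD (cnt1 - 1) 0 - 1 + 1 = S.getD (cnt1 - 1) 0 by ring]
      exact pv_expandBack_eq s k' (cnt1 - 1) hL0
    have hstartB : PySem.List.pyGetD S
          (max ((S.countP (fun p => decide (p ≤ PySem.Chars.find s b)) : Int) - 1 - max context_lines 0) 0) 0 =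
        S.getD (cnt1 - 1 - k') 0 := by
      rw [hst, hkmax]
      have harg : max (((S.countP (fun p => decide (p ≤ (st : Int)))) : Int) - 1 - (k' : Int)) 0
          = ((cnt1 - 1 - k' : Nat) : Int) := by
        rw [← hcnt1]
        omega
      rw [harg, PySem.List.pyGetD_natCast]
    -- expanded_end equality
    have hcast2 : (st : Int) + (b.length : Int) = ((st + b.length : Nat) : Int) := by push_cast; ring
    have hE : cnt2 - 1 < S.length := by omega
    have hlineA : (if PySem.Chars.findFrom s ['\n'] ((PySem.Chars.find s b) + (b.length : Int)) none = -1
          then (s.length : Int)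
          else PySem.Chars.findFrom s ['\n'] ((PySem.Chars.find s b) + (b.length : Int)) none + 1) =
        pvEndOf s (cnt2 - 1) := by
      rw [hst, hcast2, pv_findFrom_nl s (st + b.length) helen, ← hcnt2]
      by_cases hc : cnt2 < S.length
      · rw [if_pos hc]
        have hnz : S.getD cnt2 0 - 1 ≠ -1 := by
          rw [List.getD_eq_getElem _ _ hc]
          have hpos := pvLS_getElem_pos s cnt2 hc (by omega)
          simp only [← hS] at hpos
          omega
        rw [if_neg hnz, pvEndOf]
        simp only [← hS]
        rw [if_pos (show cnt2 - 1 + 1 < S.length by omega)]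
        rw [show cnt2 - 1 + 1 = cnt2 by omega]
        ring
      · rw [if_neg hc, if_pos rfl, pvEndOf]
        simp only [← hS]
        rw [if_neg (show ¬ (cnt2 - 1 + 1 < S.length) by omega)]
    have hendA : pvExpandFwd s context_lines.toNat
        (if PySem.Chars.findFrom s ['\n'] ((PySem.Chars.find s b) + (b.length : Int)) none = -1
          then (s.length : Int)
          else PySem.Chars.findFrom s ['\n'] ((PySem.Chars.find s b) + (b.length : Int)) none + 1) =
        pvEndOf s (min (cnt2 - 1 + k') (S.length - 1)) := by
      rw [hlineA]
      exact pv_expandFwd_eq s k' (cnt2 - 1) hE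
    have hendB : (if ((S.countP (fun p => decide (p ≤ PySem.Chars.find s b + (b.length : Int))) : Int) - 1 + max context_lines 0) + 1 < (S.length : Int)
          then PySem.List.pyGetD S (((S.countP (fun p => decide (p ≤ PySem.Chars.find s b + (b.length : Int))) : Int) - 1 + max context_lines 0) + 1) 0
          else (s.length : Int)) =
        pvEndOf s (min (cnt2 - 1 + k') (S.length - 1)) := by
      rw [hst, hkmax, hcast2, ← hcnt2]
      by_cases hc : cnt2 - 1 + k' + 1 < S.length
      · rw [if_pos (by omega)]
        have harg : ((cnt2 : Int) - 1 + (k' : Int)) + 1 = ((cnt2 - 1 + k' + 1 : Nat) : Int) := by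
          push_cast; omega
        rw [harg, PySem.List.pyGetD_natCast, pvEndOf]
        simp only [← hS]
        rw [if_pos (show min (cnt2 - 1 + k') (S.length - 1) + 1 < S.length by omega)]
        congr 2
        omega
      · rw [if_neg (by omega), pvEndOf]
        simp only [← hS]
        rw [if_neg (show ¬ (min (cnt2 - 1 + k') (S.length - 1) + 1 < S.length) by omega)]
    rw [hstartA, hstartB, hendA, hendB, hst]

-- ===== VERDICT (by name: the statement is the Claim_ definition above) =====
theorem expand_edit_context_spec : Claim_equal_expand_edit_context := by
  intro full_content before after context_lines _
  exact pv_main full_content before after context_lines
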